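-- pv_equiv track=rewrite | github.com/zishengz/criticAnalyzer | cps_printer.py | get_cp_list_all
-- ===== SOURCE A (Python) =====
-- def get_cp_list_all(out_raw, flag):
--     '''CP list, including equivalent ones'''
--     ncp = []
--     bcp = []
--     for i in range(flag+3, len(out_raw)):
--         l = out_raw[i]
--         if l[0] != '\n':
--             if l.split()[2] == 'n':
--                 ncp.append(l)
--             elif l.split()[2] == 'b':
--                 bcp.append(l)
--             else:
--                 break
--         else:
--             break
--     return ncp, bcp
-- ===== SOURCE B (Python) =====
-- def get_cp_list_all(out_raw, flag):
--     '''CP list, including equivalent ones'''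
--     tail = [out_raw[i] for i in range(flag + 3, len(out_raw))]
--     cut = next((k for k, l in enumerate(tail)
--                 if l[0] == '\n' or l.split()[2] not in ('n', 'b')), len(tail))
--     seg = tail[:cut]
--     ncp = [l for l in seg if l.split()[2] == 'n']
--     bcp = [l for l in seg if l.split()[2] != 'n']
--     return ncp, bcp
-- ===== Notes on version B (the rewrite author's own statement) =====
-- stated objective: alternative
-- what changed: A's single loop with two accumulators and an inline break is replaced by a find-first-stop-index pass, a slice of the valid segment, and two filter passes that partition it.
-- outside the precondition, e.g. on get_cp_list_all(['a b n'], -4): A returns (['a b n', 'a b n'], []), B returns (['a b n', 'a b n'], [])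
import Mathlib
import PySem

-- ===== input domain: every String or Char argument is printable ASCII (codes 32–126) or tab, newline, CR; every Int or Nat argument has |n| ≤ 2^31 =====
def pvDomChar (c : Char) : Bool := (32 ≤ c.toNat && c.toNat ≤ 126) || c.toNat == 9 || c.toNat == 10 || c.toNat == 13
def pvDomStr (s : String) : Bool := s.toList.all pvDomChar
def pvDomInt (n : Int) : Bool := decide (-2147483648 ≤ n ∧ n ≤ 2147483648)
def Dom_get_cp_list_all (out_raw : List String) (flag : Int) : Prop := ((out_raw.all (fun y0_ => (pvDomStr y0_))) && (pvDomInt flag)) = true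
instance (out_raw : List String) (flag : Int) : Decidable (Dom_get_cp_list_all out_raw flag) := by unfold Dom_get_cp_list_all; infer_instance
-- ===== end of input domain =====

-- B replaces A's single loop-with-break by a find-stop-index pass, a slice, and two filter
-- passes that partition the segment: a different decomposition of the same O(n) task.

-- ===== PORT A =====
-- A's loop 'for i in range(flag+3, len(out_raw))' with break; 'none' results of the PySem
-- primitives mark where the Python raises IndexError (those inputs are outside Pre_).
def pvAStep (out_raw : List String) : List Int → List String → List String → List String × List String
  | [], ncp, bcp => (ncp, bcp)
  | i :: is, ncp, bcp =>
    match PySem.List.pyGet? out_raw i with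
    | none => (ncp, bcp)          -- IndexError in Python: excluded by Pre_
    | some l =>
      match PySem.Str.pyGet? l 0 with
      | none => (ncp, bcp)        -- IndexError on l[0]: excluded by Pre_
      | some c =>
        if c ≠ '\n' then
          match PySem.List.pyGet? (PySem.Str.split₀ l) 2 with
          | none => (ncp, bcp)    -- IndexError on l.split()[2]: excluded by Pre_
          | some f =>
            if f = "n" then pvAStep out_raw is (ncp ++ [l]) bcp
            else if f = "b" then pvAStep out_raw is ncp (bcp ++ [l])
            else (ncp, bcp)       -- break
        else (ncp, bcp)           -- break

def get_cp_list_all (out_raw : List String) (flag : Int) : List String × List String :=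
  pvAStep out_raw (PySem.List.pyRange (flag + 3) (out_raw.length : Int) 1) [] []

-- ===== PORT B =====
-- the generator's predicate 'l[0] == '\n' or l.split()[2] not in ('n','b')';
-- none marks where the Python expression raises (outside Pre_)
def pvBStop (l : String) : Option Bool :=
  match PySem.Str.pyGet? l 0 with
  | none => none
  | some c =>
    if c = '\n' then some true
    else
      match PySem.List.pyGet? (PySem.Str.split₀ l) 2 with
      | none => none
      | some f => some (!(f == "n" || f == "b"))

-- the 'next(...)' search: index of the first stopping line, length if none
def pvFindCut : List String → Nat
  | [] => 0
  | l :: ls =>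
    match pvBStop l with
    | none => 0                   -- Python raises here: excluded by Pre_
    | some true => 0
    | some false => pvFindCut ls + 1

def pvThirdIsN (l : String) : Bool := PySem.List.pyGet? (PySem.Str.split₀ l) 2 == some "n"

def get_cp_list_all_alt (out_raw : List String) (flag : Int) : List String × List String :=
  let tail := (PySem.List.pyRange (flag + 3) (out_raw.length : Int) 1).filterMap
    (fun i => PySem.List.pyGet? out_raw i)
  let seg := tail.take (pvFindCut tail)
  (seg.filter pvThirdIsN, seg.filter (fun l => !(pvThirdIsN l)))

-- ===== PRECONDITION & SPEC =====
-- pvCont: line is kept and the scan continues (first char not '\n', third field 'n' or 'b')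
def pvCont (l : String) : Bool :=
  match PySem.Str.pyGet? l 0 with
  | none => false
  | some c =>
    if c = '\n' then false
    else (PySem.List.pyGet? (PySem.Str.split₀ l) 2 == some "n"
          || PySem.List.pyGet? (PySem.Str.split₀ l) 2 == some "b")

-- pvOkStop: the scan stops at this line WITHOUT raising (starts with '\n', or has ≥ 3 fields)
def pvOkStop (l : String) : Bool :=
  match PySem.Str.pyGet? l 0 with
  | none => false
  | some c => c == '\n' || (PySem.List.pyGet? (PySem.Str.split₀ l) 2).isSome

-- Pre_ restricts to the natural domain 0 ≤ flag+3 (a negative start index makes Python's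
-- negative-index wraparound re-read lines from the end, outside the function's intended use;
-- B happens to agree with A there too), and requires that the first non-kept scanned line,
-- if any, stops the scan rather than raising IndexError (A raises on an empty line or a
-- line with fewer than 3 fields).
def Pre_get_cp_list_all (out_raw : List String) (flag : Int) : Prop :=
  0 ≤ flag + 3 ∧
  (((out_raw.drop (flag + 3).toNat).dropWhile pvCont).head?.all pvOkStop = true)

instance (out_raw : List String) (flag : Int) : Decidable (Pre_get_cp_list_all out_raw flag) := by
  unfold Pre_get_cp_list_all; infer_instance

def pvWitness_get_cp_list_all : List String × Int := (["1 2 n", "3 4 b", "\nEnd"], -3)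

def Spec_get_cp_list_all (out_raw : List String) (flag : Int) (out : List String × List String) : Prop := out = get_cp_list_all_alt out_raw flag
instance (out_raw : List String) (flag : Int) (out : List String × List String) : Decidable (Spec_get_cp_list_all out_raw flag out) := by unfold Spec_get_cp_list_all; infer_instance

-- ===== CLAIM (what is proved, stated in full; the proofs are below) =====
def Claim_equal_get_cp_list_all : Prop := ∀ (out_raw : List String) (flag : Int), Dom_get_cp_list_all out_raw flag → Pre_get_cp_list_all out_raw flag → Spec_get_cp_list_all out_raw flag (get_cp_list_all out_raw flag)

-- ===== LEMMAS AND PROOFS =====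

-- A's loop restated on the list of scanned lines (proof device)
def pvGoT : List String → List String → List String → List String × List String
  | [], ncp, bcp => (ncp, bcp)
  | l :: ls, ncp, bcp =>
    match PySem.Str.pyGet? l 0 with
    | none => (ncp, bcp)
    | some c =>
      if c ≠ '\n' then
        match PySem.List.pyGet? (PySem.Str.split₀ l) 2 with
        | none => (ncp, bcp)
        | some f =>
          if f = "n" then pvGoT ls (ncp ++ [l]) bcp
          else if f = "b" then pvGoT ls ncp (bcp ++ [l])
          else (ncp, bcp)
      else (ncp, bcp)

theorem pvAStep_drop_aux (xs : List String) (n : Nat) :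
    ∀ (a : Nat) (ncp bcp : List String), xs.length - a ≤ n →
    pvAStep xs (PySem.List.pyRange (a : Int) (xs.length : Int) 1) ncp bcp
      = pvGoT (xs.drop a) ncp bcp := by
  induction n with
  | zero =>
    intro a ncp bcp h
    have hge : xs.length ≤ a := by omega
    rw [PySem.List.pyRange_one_eq_nil (by exact_mod_cast hge), List.drop_eq_nil_of_le hge]
    simp [pvAStep, pvGoT]
  | succ n ih =>
    intro a ncp bcp h
    by_cases hlt : a < xs.length
    · rw [PySem.List.pyRange_one_cons (by exact_mod_cast hlt)]
      have hget : PySem.List.pyGet? xs (a : Int) = some xs[a] := by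
        rw [PySem.List.pyGet?_natCast]; simp [hlt]
      have hcast : (a : Int) + 1 = ((a + 1 : Nat) : Int) := by push_cast; ring
      have hdrop : xs.drop a = xs[a] :: xs.drop (a + 1) := List.drop_eq_getElem_cons hlt
      generalize hl : xs[a] = l at hget hdrop
      rw [hdrop]
      simp only [pvAStep, pvGoT, hget, hcast]
      cases hc : PySem.Str.pyGet? l 0 with
      | none => simp
      | some c =>
        by_cases hnl : c = '\n'
        · simp [hnl]
        · cases hf : PySem.List.pyGet? (PySem.Str.split₀ l) 2 with
          | none => simp [hnl]
          | some f =>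
            by_cases hfn : f = "n"
            · simp only [hnl, hfn, ne_eq, not_false_iff, if_pos]
              simp
              exact ih (a + 1) (ncp ++ [l]) bcp (by omega)
            · by_cases hfb : f = "b"
              · simp only [hfb]
                simp [hnl]
                exact ih (a + 1) ncp (bcp ++ [l]) (by omega)
              · simp [hnl, hfn, hfb]
    · have hge : xs.length ≤ a := by omega
      rw [PySem.List.pyRange_one_eq_nil (by exact_mod_cast hge), List.drop_eq_nil_of_le hge]
      simp [pvAStep, pvGoT]

theorem pvAStep_drop (xs : List String) (a : Nat) (ncp bcp : List String) :
    pvAStep xs (PySem.List.pyRange (a : Int) (xs.length : Int) 1) ncp bcp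
      = pvGoT (xs.drop a) ncp bcp :=
  pvAStep_drop_aux xs (xs.length - a) a ncp bcp le_rfl

theorem pvTail_drop (xs : List String) (a : Nat) :
    (PySem.List.pyRange (a : Int) (xs.length : Int) 1).filterMap
      (fun i => PySem.List.pyGet? xs i) = xs.drop a := by
  induction hn : xs.length - a generalizing a with
  | zero =>
    have hge : xs.length ≤ a := by omega
    rw [PySem.List.pyRange_one_eq_nil (by exact_mod_cast hge), List.drop_eq_nil_of_le hge]
    rfl
  | succ n ih =>
    have hlt : a < xs.length := by omega
    rw [PySem.List.pyRange_one_cons (by exact_mod_cast hlt)]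
    have hget : PySem.List.pyGet? xs (a : Int) = some xs[a] := by
      rw [PySem.List.pyGet?_natCast]; simp [hlt]
    have hcast : (a : Int) + 1 = ((a + 1 : Nat) : Int) := by push_cast; ring
    rw [List.drop_eq_getElem_cons hlt, List.filterMap_cons, hget, hcast,
      ih (a + 1) (by omega)]

theorem pvGoT_eq (ts : List String) (ncp bcp : List String)
    (h : ((ts.dropWhile pvCont).head?.all pvOkStop) = true) :
    pvGoT ts ncp bcp
      = (ncp ++ (ts.take (pvFindCut ts)).filter pvThirdIsN,
         bcp ++ (ts.take (pvFindCut ts)).filter (fun l => !(pvThirdIsN l))) := by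
  induction ts generalizing ncp bcp with
  | nil => simp [pvGoT, pvFindCut]
  | cons l ls ih =>
    simp only [pvGoT]
    cases hc : PySem.Str.pyGet? l 0 with
    | none =>
      have hc' : PySem.List.pyGet? l.toList 0 = none := hc
      have hcont : pvCont l = false := by simp [pvCont, hc']
      have hok : pvOkStop l = false := by simp [pvOkStop, hc']
      rw [List.dropWhile_cons] at h
      simp [hcont, hok] at h
    | some c =>
      have hc' : PySem.List.pyGet? l.toList 0 = some c := hc
      by_cases hnl : c = '\n'
      · have hstop : pvBStop l = some true := by simp [pvBStop, hc', hnl]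
        simp [hnl, pvFindCut, hstop]
      · cases hf : PySem.List.pyGet? (PySem.Str.split₀ l) 2 with
        | none =>
          have hcont : pvCont l = false := by simp [pvCont, hc', hnl, hf]
          have hok : pvOkStop l = false := by simp [pvOkStop, hc', hnl, hf]
          rw [List.dropWhile_cons] at h
          simp [hcont, hok] at h
        | some f =>
          have hcont' : pvCont l = (f == "n" || f == "b") := by
            simp [pvCont, hc', hnl, hf]
          by_cases hfn : f = "n"
          · have hstop : pvBStop l = some false := by simp [pvBStop, hc', hnl, hf, hfn]
            have h' : ((ls.dropWhile pvCont).head?.all pvOkStop) = true := by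
              rwa [List.dropWhile_cons, if_pos (by simp [hcont', hfn])] at h
            have h3 : pvThirdIsN l = true := by simp [pvThirdIsN, hf, hfn]
            rw [ih (ncp ++ [l]) bcp h']
            simp [hnl, hfn, h3, hstop, pvFindCut]
          · by_cases hfb : f = "b"
            · have hstop : pvBStop l = some false := by simp [pvBStop, hc', hnl, hf, hfb]
              have h' : ((ls.dropWhile pvCont).head?.all pvOkStop) = true := by
                rwa [List.dropWhile_cons, if_pos (by simp [hcont', hfb])] at h
              have h3 : pvThirdIsN l = false := by simp [pvThirdIsN, hf, hfn]
              rw [ih ncp (bcp ++ [l]) h']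
              simp [hnl, hfb, h3, hstop, pvFindCut]
            · have hstop : pvBStop l = some true := by simp [pvBStop, hc', hnl, hf, hfn, hfb]
              simp [hnl, hfn, hfb, pvFindCut, hstop]

-- ===== VERDICT (by name: the statement is the Claim_ definition above) =====
theorem get_cp_list_all_spec : Claim_equal_get_cp_list_all := by
  intro out_raw flag _ hpre
  obtain ⟨h0, h1⟩ := hpre
  unfold Spec_get_cp_list_all get_cp_list_all get_cp_list_all_alt
  have ha : flag + 3 = ((flag + 3).toNat : Int) := (Int.toNat_of_nonneg h0).symm
  rw [ha, pvAStep_drop, pvTail_drop, pvGoT_eq _ _ _ h1]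
  simp
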